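-- pv_equiv track=rewrite | github.com/Shohan74111121/Hacker_rank_code_solved | U.py | pickingcountbers
-- ===== SOURCE A (Python) =====
-- def pickingcountbers(a):
--     a.sort()
--     maxi = start = count = 0
--     for i in range(len(a)):
--         if a[i]-a[start] >= 2:
--             count = 1
--             maxi = max(maxi, i-start)
--             start = i
--         else:
--             count += 1
--     return max(maxi, count)
-- ===== SOURCE B (Python) =====
-- def pickingcountbers(a):
--     # Sort in place (same observable mutation as the original), then jump from
--     # greedy-segment start to segment end with a hand-rolled binary search.
--     a.sort()
--     n = len(a)
--     best = 0
--     start = 0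
--     while start < n:
--         limit = a[start] + 2
--         lo, hi = start + 1, n
--         while lo < hi:
--             mid = (lo + hi) // 2
--             if a[mid] < limit:
--                 lo = mid + 1
--             else:
--                 hi = mid
--         if lo - start > best:
--             best = lo - start
--         start = lo
--     return best
-- ===== Notes on version B (the rewrite author's own statement) =====
-- stated objective: alternative
-- what changed: Instead of scanning every index and maintaining a running count, B sorts and then jumps from each greedy-segment start directly to its end with a hand-rolled binary search for the first element >= a[start]+2, taking the max segment length.
import Mathlib
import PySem

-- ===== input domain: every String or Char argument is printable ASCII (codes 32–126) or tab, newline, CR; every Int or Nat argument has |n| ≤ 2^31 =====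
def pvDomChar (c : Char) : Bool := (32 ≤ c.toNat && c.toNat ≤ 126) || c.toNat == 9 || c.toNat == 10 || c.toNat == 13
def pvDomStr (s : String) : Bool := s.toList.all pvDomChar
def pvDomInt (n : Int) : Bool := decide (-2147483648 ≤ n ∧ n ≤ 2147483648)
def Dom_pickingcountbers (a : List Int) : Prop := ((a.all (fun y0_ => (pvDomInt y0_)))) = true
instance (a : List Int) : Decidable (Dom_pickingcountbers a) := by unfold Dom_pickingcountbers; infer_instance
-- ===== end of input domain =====

-- B replaces A's element-by-element scan by binary-search jumps from each greedy-segment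
-- start to its end (objective: alternative). Both A and B sort the caller's list in place
-- in Python; the equivalence proved here is about the return value.

-- ===== PORT A =====
-- loop state (maxi, start, count)
def pcBody (a : List Int) (st : Int × Int × Int) (i : Int) : Int × Int × Int :=
  if PySem.List.pyGetD a i 0 - PySem.List.pyGetD a st.2.1 0 ≥ 2 then
    (max st.1 (i - st.2.1), i, 1)
  else (st.1, st.2.1, st.2.2 + 1)

def pickingcountbers (a : List Int) : Int :=
  let s := PySem.List.sorted a (fun x => x) false
  let st := (PySem.List.pyRange 0 (s.length : Int) 1).foldl (pcBody s) (0, 0, 0)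
  max st.1 st.2.2

-- ===== PORT B =====
-- inner 'while lo < hi' binary search of Source B; the Nat argument is loop fuel
-- (hi - lo shrinks every iteration, so (hi - lo).toNat at the call site is enough)
def pcFind (a : List Int) (limit : Int) : Nat → Int → Int → Int
  | 0, lo, _ => lo
  | fuel + 1, lo, hi =>
    if lo < hi then
      let mid := PySem.Int.floordiv (lo + hi) 2
      if PySem.List.pyGetD a mid 0 < limit then pcFind a limit fuel (mid + 1) hi
      else pcFind a limit fuel lo mid
    else lo

-- outer 'while start < n' loop of Source B; start grows every iteration, so (n - start).toNat fuel
def pcLoop (a : List Int) (n : Int) : Nat → Int → Int → Int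
  | 0, _, best => best
  | fuel + 1, start, best =>
    if start < n then
      let lo := pcFind a (PySem.List.pyGetD a start 0 + 2) (n - (start + 1)).toNat (start + 1) n
      pcLoop a n fuel lo (if lo - start > best then lo - start else best)
    else best

def pickingcountbers_alt (a : List Int) : Int :=
  let s := PySem.List.sorted a (fun x => x) false
  pcLoop s (s.length : Int) s.length 0 0

-- ===== PRECONDITION & SPEC =====
def Spec_pickingcountbers (a : List Int) (out : Int) : Prop := out = pickingcountbers_alt a
instance (a : List Int) (out : Int) : Decidable (Spec_pickingcountbers a out) := by unfold Spec_pickingcountbers; infer_instance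

-- ===== CLAIM (what is proved, stated in full; the proofs are below) =====
def Claim_equal_pickingcountbers : Prop := ∀ (a : List Int), Dom_pickingcountbers a → Spec_pickingcountbers a (pickingcountbers a)

-- ===== LEMMAS AND PROOFS =====

-- arithmetic fact about Python's (lo+hi)//2
theorem pcFloor2 (lo hi : Int) (h : lo < hi) :
    lo ≤ PySem.Int.floordiv (lo + hi) 2 ∧ PySem.Int.floordiv (lo + hi) 2 < hi := by
  unfold PySem.Int.floordiv
  simp [Int.fdiv_eq_ediv]
  omega

-- sortedness, as monotonicity of pyGetD
def PcMono (a : List Int) : Prop :=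
  ∀ p q : Int, 0 ≤ p → p ≤ q → q < (a.length : Int) →
    PySem.List.pyGetD a p 0 ≤ PySem.List.pyGetD a q 0

theorem pcMono_sorted (a : List Int) : PcMono (PySem.List.sorted a (fun x => x) false) := by
  intro p q hp hpq hq
  rw [PySem.List.pyGetD_eq_getElem _ 0 hp (by omega),
      PySem.List.pyGetD_eq_getElem _ 0 (le_trans hp hpq) hq]
  exact PySem.List.sorted_id_getElem_mono a (by omega) (by omega)

-- pcFind (with enough fuel) computes the first boundary index in [lo, hi)
theorem pcFind_spec (a : List Int) (limit : Int) (hm : PcMono a) (fuel : Nat) :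
    ∀ lo hi : Int, 0 ≤ lo → hi ≤ (a.length : Int) → lo ≤ hi → (hi - lo).toNat ≤ fuel →
    lo ≤ pcFind a limit fuel lo hi ∧ pcFind a limit fuel lo hi ≤ hi ∧
      (∀ k : Int, lo ≤ k → k < pcFind a limit fuel lo hi → PySem.List.pyGetD a k 0 < limit) ∧
      (pcFind a limit fuel lo hi < hi → ¬ PySem.List.pyGetD a (pcFind a limit fuel lo hi) 0 < limit) := by
  induction fuel with
  | zero =>
    intro lo hi hlo hhi hlohi hfuel
    have : hi = lo := by omega
    simp only [pcFind]
    exact ⟨le_refl lo, by omega, by intro k h1 h2; omega, by intro h1; omega⟩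
  | succ fuel ih =>
    intro lo hi hlo hhi hlohi hfuel
    by_cases h : lo < hi
    · simp only [pcFind, if_pos h]
      have hmid := pcFloor2 lo hi h
      by_cases hb : PySem.List.pyGetD a (PySem.Int.floordiv (lo + hi) 2) 0 < limit
      · simp only [if_pos hb]
        obtain ⟨h1, h2, h3, h4⟩ := ih (PySem.Int.floordiv (lo + hi) 2 + 1) hi
          (by omega) hhi (by omega) (by omega)
        refine ⟨by omega, h2, ?_, h4⟩
        intro k hk1 hk2
        by_cases hk : PySem.Int.floordiv (lo + hi) 2 + 1 ≤ k
        · exact h3 k hk hk2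
        · exact lt_of_le_of_lt
            (hm k (PySem.Int.floordiv (lo + hi) 2) (by omega) (by omega) (by omega)) hb
      · simp only [if_neg hb]
        obtain ⟨h1, h2, h3, h4⟩ := ih lo (PySem.Int.floordiv (lo + hi) 2)
          hlo (by omega) (by omega) (by omega)
        refine ⟨h1, by omega, h3, ?_⟩
        intro hr habs
        by_cases hrm : pcFind a limit fuel lo (PySem.Int.floordiv (lo + hi) 2) <
            PySem.Int.floordiv (lo + hi) 2
        · exact h4 hrm habs
        · have hreq : pcFind a limit fuel lo (PySem.Int.floordiv (lo + hi) 2) =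
              PySem.Int.floordiv (lo + hi) 2 := by omega
          rw [hreq] at habs; exact hb habs
    · simp only [pcFind, if_neg h]
      exact ⟨le_refl lo, by omega, by intro k h1 h2; omega, by intro h1; omega⟩

-- once start has reached n, pcLoop returns best whatever the fuel
theorem pcLoop_stop (a : List Int) (n : Int) (fuel : Nat) (start best : Int)
    (h : ¬ start < n) : pcLoop a n fuel start best = best := by
  cases fuel with
  | zero => rfl
  | succ fuel => simp only [pcLoop, if_neg h]

-- the last (boundary-free) segment: A's closing max(maxi, count) equals what pcLoop adds
theorem pcEnd (a : List Int) (s maxi : Int) (hm : PcMono a)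
    (hs : 0 ≤ s) (hsn : s ≤ (a.length : Int)) (hmx : 0 ≤ maxi)
    (hflat : ∀ k : Int, s ≤ k → k < (a.length : Int) →
      PySem.List.pyGetD a k 0 < PySem.List.pyGetD a s 0 + 2) :
    ∀ f : Nat, ((a.length : Int) - s).toNat ≤ f →
    max maxi ((a.length : Int) - s) = pcLoop a (a.length : Int) f s maxi := by
  intro f hf
  set n : Int := (a.length : Int) with hn
  by_cases hsn' : s < n
  · obtain ⟨f', rfl⟩ : ∃ f', f = f' + 1 := ⟨f - 1, by omega⟩
    simp only [pcLoop, if_pos hsn']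
    obtain ⟨h1, h2, h3, h4⟩ := pcFind_spec a (PySem.List.pyGetD a s 0 + 2) hm
      (n - (s + 1)).toNat (s + 1) n (by omega) (by omega) (by omega) (by omega)
    set r := pcFind a (PySem.List.pyGetD a s 0 + 2) (n - (s + 1)).toNat (s + 1) n with hr
    have hreq : r = n := by
      by_contra hne
      exact (h4 (by omega)) (hflat r (by omega) (by omega))
    rw [hreq, pcLoop_stop a n f' n _ (lt_irrefl n)]
    split_ifs with h <;> omega
  · rw [pcLoop_stop a n f s maxi hsn']
    omega

-- main invariant: mid-segment at index i0 with boundary-free prefix [s, i0),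
-- A's remaining fold equals pcLoop resumed from segment start s
theorem pcMain (a : List Int) (k : Nat) :
    ∀ i0 s maxi : Int, PcMono a → 0 ≤ s → s ≤ i0 → i0 ≤ (a.length : Int) → 0 ≤ maxi →
    ((a.length : Int) - i0).toNat ≤ k →
    (∀ j : Int, s ≤ j → j < i0 →
      PySem.List.pyGetD a j 0 < PySem.List.pyGetD a s 0 + 2) →
    ∀ f : Nat, ((a.length : Int) - s).toNat ≤ f →
    (let st := (PySem.List.pyRange i0 (a.length : Int) 1).foldl (pcBody a) (maxi, s, i0 - s)
     max st.1 st.2.2) = pcLoop a (a.length : Int) f s maxi := by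
  induction k with
  | zero =>
    intro i0 s maxi hm hs hsi hi0 hmx hk hflat f hf
    have hi0n : i0 = (a.length : Int) := by omega
    rw [hi0n, PySem.List.pyRange_one_eq_nil (le_refl _)]
    simp only [List.foldl_nil]
    rw [hi0n] at hflat
    exact pcEnd a s maxi hm hs (by omega) hmx hflat f hf
  | succ k ih =>
    intro i0 s maxi hm hs hsi hi0 hmx hk hflat f hf
    set n : Int := (a.length : Int) with hn
    by_cases hend : i0 < n
    · rw [PySem.List.pyRange_one_cons hend]
      simp only [List.foldl_cons]
      by_cases hb : PySem.List.pyGetD a i0 0 - PySem.List.pyGetD a s 0 ≥ 2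
      · -- boundary at i0: A restarts the segment there, B's binary search lands on i0
        have hsne : s < i0 := by
          rcases eq_or_lt_of_le hsi with h | h
          · exfalso; rw [h] at hb; omega
          · exact h
        have hstep : pcBody a (maxi, s, i0 - s) i0 = (max maxi (i0 - s), i0, 1) := by
          simp [pcBody, hb]
        rw [hstep]
        obtain ⟨f', rfl⟩ : ∃ f', f = f' + 1 := ⟨f - 1, by omega⟩
        have hih := ih (i0 + 1) i0 (max maxi (i0 - s)) hm (by omega) (by omega)
          (by omega) (by omega) (by omega)
          (by intro j h1 h2
              have hj : j = i0 := by omega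
              rw [hj]; omega)
          f' (by omega)
        have harith : i0 + 1 - i0 = (1 : Int) := by ring
        rw [harith] at hih
        rw [hih]
        conv_rhs => rw [pcLoop]
        simp only [if_pos (show s < n from by omega)]
        obtain ⟨h1, h2, h3, h4⟩ := pcFind_spec a (PySem.List.pyGetD a s 0 + 2) hm
          (n - (s + 1)).toNat (s + 1) n (by omega) (by omega) (by omega) (by omega)
        set r := pcFind a (PySem.List.pyGetD a s 0 + 2) (n - (s + 1)).toNat (s + 1) n with hr
        have hreq : r = i0 := by
          by_contra hne
          rcases lt_or_gt_of_ne hne with h | h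
          · exact (h4 (by omega)) (hflat r (by omega) h)
          · have := h3 i0 (by omega) h; omega
        rw [hreq]
        have hmax : (if i0 - s > maxi then i0 - s else maxi) = max maxi (i0 - s) := by
          split_ifs with h <;> omega
        rw [hmax]
      · -- no boundary: the count grows and the segment continues
        have hstep : pcBody a (maxi, s, i0 - s) i0 = (maxi, s, i0 - s + 1) := by
          simp only [pcBody, if_neg hb]
        rw [hstep]
        have hih := ih (i0 + 1) s maxi hm hs (by omega) (by omega) hmx (by omega)
          (by intro j h1 h2
              by_cases hj : j < i0
              · exact hflat j h1 hj
              · have : j = i0 := by omega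
                rw [this]; omega)
          f hf
        have harith : i0 + 1 - s = i0 - s + 1 := by ring
        rw [harith] at hih
        exact hih
    · have hi0n : i0 = n := by omega
      rw [hi0n, PySem.List.pyRange_one_eq_nil (le_refl n)]
      simp only [List.foldl_nil]
      rw [hi0n] at hflat
      exact pcEnd a s maxi hm hs (by omega) hmx hflat f hf

-- ===== VERDICT (by name: the statement is the Claim_ definition above) =====
theorem pickingcountbers_spec : Claim_equal_pickingcountbers := by
  intro a _
  unfold Spec_pickingcountbers pickingcountbers pickingcountbers_alt
  set s := PySem.List.sorted a (fun x => x) false with hs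
  have h := pcMain s s.length 0 0 0 (pcMono_sorted a) (le_refl 0) (le_refl 0)
    (by exact_mod_cast Int.natCast_nonneg s.length) (le_refl 0)
    (by omega) (by intro j h1 h2; omega) s.length (by omega)
  simpa using h
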